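-- pv_equiv track=rewrite | github.com/tamu-edu/ng911-dev | test_suite/services/aux_services/message_services.py | extract_header_field_value_from_raw_string_body
-- ===== SOURCE A (Python) =====
-- def extract_header_field_value_from_raw_string_body(header_name: str, raw_message_body_string: str) -> str:
--     """
--     Extracts value of header field from raw message
--     :param header_name: Name of header field
--     :param raw_message_body_string: raw string body
--     :return: Value of header field or None
--     """
--     if not header_name:
--         return ""
--     header_name = header_name.replace(":", "")
--     for line in raw_message_body_string.splitlines():
--         if line.lower().startswith(header_name.lower() + ":"):
--             return line.split(":", 1)[1].strip()
--     return ""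
-- ===== SOURCE B (Python) =====
-- def extract_header_field_value_from_raw_string_body(header_name: str, raw_message_body_string: str) -> str:
--     if not header_name:
--         return ""
--     table = {}
--     for line in raw_message_body_string.splitlines():
--         parts = line.split(":", 1)
--         if len(parts) == 2:
--             key = parts[0].lower()
--             if key not in table:
--                 table[key] = parts[1].strip()
--     return table.get(header_name.replace(":", "").lower(), "")
-- ===== Notes on version B (the rewrite author's own statement) =====
-- stated objective: alternative
-- what changed: A scans splitlines with a per-line lowercase+startswith test and returns at the first match; B makes one pass over splitlines building a first-wins dict from each line's lowercased name before the first colon to its stripped value, then answers with a single dict lookup.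
import Mathlib
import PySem

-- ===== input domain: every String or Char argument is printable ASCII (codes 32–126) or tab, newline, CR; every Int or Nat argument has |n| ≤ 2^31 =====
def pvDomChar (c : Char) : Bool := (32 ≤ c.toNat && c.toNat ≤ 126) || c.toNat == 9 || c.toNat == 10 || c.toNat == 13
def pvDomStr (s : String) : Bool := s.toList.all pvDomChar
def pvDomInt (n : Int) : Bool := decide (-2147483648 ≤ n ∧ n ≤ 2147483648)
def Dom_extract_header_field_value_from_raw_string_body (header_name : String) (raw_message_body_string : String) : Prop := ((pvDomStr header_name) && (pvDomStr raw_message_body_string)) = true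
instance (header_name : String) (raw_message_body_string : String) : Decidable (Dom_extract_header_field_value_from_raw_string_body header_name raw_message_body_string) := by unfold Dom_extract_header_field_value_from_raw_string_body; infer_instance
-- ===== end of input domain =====

-- B replaces A's scan-until-match loop by one pass that builds a first-wins table of all header
-- lines (lowercased name before the first ':' → stripped value) and then does a single lookup
-- (alternative decomposition, same asymptotic cost).

-- ===== PORT A =====
-- A's for-loop over splitlines: return the first matching line's value, else keep scanning.
def pvALoop (hn : String) : List String → String
  | [] => ""
  | line :: rest =>
    if PySem.Str.startswith (PySem.Str.lower line) (PySem.Str.lower hn ++ ":") then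
      match PySem.Str.splitMax? line ":" 1 with
      | some parts =>
        match PySem.List.pyGet? parts 1 with
        | some v => PySem.Str.strip v
        | none => ""   -- unreachable: the matched line contains ':', so the split has a second piece
      | none => ""     -- unreachable: the separator ":" is nonempty
    else pvALoop hn rest

def extract_header_field_value_from_raw_string_body (header_name : String) (raw_message_body_string : String) : String :=
  if header_name = "" then ""
  else pvALoop (PySem.Str.replace header_name ":" "") (PySem.Str.splitlines raw_message_body_string)

-- ===== PORT B =====
-- B's single pass: the first-wins table mapping each line's lowercased name (before the first ':')
-- to its stripped value, then one lookup.
def pvBTable : List String → PySem.Dict String String → PySem.Dict String String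
  | [], d => d
  | line :: rest, d =>
    pvBTable rest
      (match PySem.Str.splitMax? line ":" 1 with
       | some [name, value] =>
         let k := PySem.Str.lower name
         if d.contains k then d else d.insert k (PySem.Str.strip value)
       | _ => d)

def extract_header_field_value_from_raw_string_body_alt (header_name : String) (raw_message_body_string : String) : String :=
  if header_name = "" then ""
  else
    (pvBTable (PySem.Str.splitlines raw_message_body_string) PySem.Dict.empty).getD
      (PySem.Str.lower (PySem.Str.replace header_name ":" "")) ""

-- ===== PRECONDITION & SPEC =====
def Spec_extract_header_field_value_from_raw_string_body (header_name : String) (raw_message_body_string : String) (out : String) : Prop := out = extract_header_field_value_from_raw_string_body_alt header_name raw_message_body_string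
instance (header_name : String) (raw_message_body_string : String) (out : String) : Decidable (Spec_extract_header_field_value_from_raw_string_body header_name raw_message_body_string out) := by unfold Spec_extract_header_field_value_from_raw_string_body; infer_instance

-- ===== CLAIM (what is proved, stated in full; the proofs are below) =====
def Claim_equal_extract_header_field_value_from_raw_string_body : Prop := ∀ (header_name : String) (raw_message_body_string : String), Dom_extract_header_field_value_from_raw_string_body header_name raw_message_body_string → Spec_extract_header_field_value_from_raw_string_body header_name raw_message_body_string (extract_header_field_value_from_raw_string_body header_name raw_message_body_string)

-- ===== LEMMAS AND PROOFS =====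

theorem pvLowerChar_eq_colon_iff (c : Char) : PySem.Chars.lowerChar c = ':' ↔ c = ':' := by
  unfold PySem.Chars.lowerChar
  split
  · rename_i h
    simp only [PySem.Chars.isupper, Bool.and_eq_true, decide_eq_true_eq, Char.le_def] at h
    have h65 : 65 ≤ c.toNat := h.1
    have h90 : c.toNat ≤ 90 := h.2
    have hv : Nat.isValidChar (c.toNat + 32) := Or.inl (by omega)
    have ht : (Char.ofNat (c.toNat + 32)).toNat = c.toNat + 32 := by
      rw [Char.toNat_ofNat, if_pos hv]
    constructor
    · intro he
      rw [he] at ht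
      exfalso
      have : (':' : Char).toNat = 58 := by decide
      omega
    · intro he
      subst he
      exfalso
      have : (':' : Char).toNat = 58 := by decide
      omega
  · simp

theorem pvColon_not_mem_lower (l : List Char) (h : ':' ∉ l) : ':' ∉ PySem.Chars.lower l := by
  unfold PySem.Chars.lower
  intro hm
  obtain ⟨c, hc, he⟩ := List.mem_map.mp hm
  exact h ((pvLowerChar_eq_colon_iff c).mp he ▸ hc)

theorem pvReplace_go_colon (fuel : ℕ) (l acc : List Char) (hf : l.length ≤ fuel) (ha : ':' ∉ acc) :
    ':' ∉ PySem.Chars.replace.go [':'] [] fuel l acc := by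
  induction fuel generalizing l acc with
  | zero =>
    have : l = [] := List.length_eq_zero_iff.mp (Nat.le_zero.mp hf)
    subst this
    rw [PySem.Chars.replace.go.eq_def]
    simpa using ha
  | succ n ih =>
    cases l with
    | nil => rw [PySem.Chars.replace.go.eq_def]; simpa using ha
    | cons c t =>
      rw [PySem.Chars.replace.go.eq_def]
      simp only [List.isPrefixOf, Bool.and_true, List.length_cons,
        List.drop_succ_cons, List.reverse_nil, List.nil_append]
      by_cases hc : c = ':'
      · subst hc
        simp only [beq_self_eq_true, if_true]
        exact ih t acc (by simpa using hf) ha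
      · have hb : (':' == c) = false := beq_eq_false_iff_ne.mpr (Ne.symm hc)
        simp only [hb, Bool.false_eq_true, if_false]
        refine ih t (c :: acc) (by simpa using hf) ?_
        intro hm
        rcases List.mem_cons.mp hm with h | h
        · exact hc h.symm
        · exact ha h

theorem pvColon_not_mem_replace (s : String) : ':' ∉ (PySem.Str.replace s ":" "").toList := by
  rw [PySem.Str.toList_replace]
  have h1 : (":" : String).toList = [':'] := by decide
  have h2 : ("" : String).toList = [] := by decide
  rw [h1, h2]
  unfold PySem.Chars.replace
  simp only [List.isEmpty_cons, if_false, Bool.false_eq_true]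
  exact pvReplace_go_colon _ _ _ le_rfl (by simp)

theorem pvGo_zero (fuel : ℕ) (l cur : List Char) (acc : List (List Char)) :
    PySem.Chars.splitOnMax.go [':'] fuel 0 l cur acc = ((cur.reverse ++ l) :: acc).reverse := by
  cases fuel with
  | zero => rw [PySem.Chars.splitOnMax.go.eq_def]
  | succ n =>
    cases l with
    | nil => rw [PySem.Chars.splitOnMax.go.eq_def]; simp
    | cons c t => rw [PySem.Chars.splitOnMax.go.eq_def]; simp

theorem pvGo_one (fuel : ℕ) (l cur : List Char) (acc : List (List Char)) (hf : l.length < fuel) :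
    PySem.Chars.splitOnMax.go [':'] fuel 1 l cur acc =
      if ':' ∈ l then
        ((l.dropWhile (fun c => c != ':')).drop 1 :: (cur.reverse ++ l.takeWhile (fun c => c != ':')) :: acc).reverse
      else ((cur.reverse ++ l) :: acc).reverse := by
  induction fuel generalizing l cur acc with
  | zero => omega
  | succ n ih =>
    cases l with
    | nil => rw [PySem.Chars.splitOnMax.go.eq_def]; simp
    | cons c t =>
      rw [PySem.Chars.splitOnMax.go.eq_def]
      simp only [Nat.succ_ne_zero, if_false, List.isPrefixOf,
        Bool.and_true, List.drop_succ_cons, List.drop_zero, one_ne_zero]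
      by_cases hc : c = ':'
      · subst hc
        simp only [beq_self_eq_true, if_true]
        rw [pvGo_zero]
        simp
      · have hb : (':' == c) = false := beq_eq_false_iff_ne.mpr (Ne.symm hc)
        have hb2 : (c != ':') = true := by simp [hc]
        simp only [hb, Bool.false_eq_true, if_false]
        rw [ih t (c :: cur) acc (by simpa using hf)]
        simp only [List.mem_cons, List.takeWhile_cons, List.dropWhile_cons, hb2, if_true]
        have : (':' = c) ↔ False := ⟨fun h => hc h.symm, False.elim⟩
        simp [this]

theorem pvSplit_colon (l : List Char) :
    PySem.Chars.splitMax? l [':'] 1 =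
      some (if ':' ∈ l then [l.takeWhile (fun c => c != ':'), (l.dropWhile (fun c => c != ':')).drop 1] else [l]) := by
  unfold PySem.Chars.splitMax?
  simp only [List.isEmpty_cons, Bool.false_eq_true, if_false]
  unfold PySem.Chars.splitOnMax
  rw [if_neg (by norm_num)]
  simp only [Int.toNat_one]
  rw [pvGo_one _ _ _ _ (by omega)]
  by_cases h : ':' ∈ l <;> simp [h]

theorem pvStartswith_iff (cl k : List Char) (hk : ':' ∉ k) :
    PySem.Chars.startswith (PySem.Chars.lower cl) (k ++ [':']) = true ↔
      ':' ∈ cl ∧ PySem.Chars.lower (cl.takeWhile (fun c => c != ':')) = k := by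
  unfold PySem.Chars.startswith PySem.Chars.lower
  rw [List.isPrefixOf_iff_prefix]
  induction cl generalizing k with
  | nil => simp
  | cons c t ih =>
    simp only [List.map_cons, List.mem_cons, List.takeWhile_cons]
    by_cases hc : c = ':'
    · subst hc
      simp only [bne_self_eq_false, if_false, List.map_nil]
      have hl : PySem.Chars.lowerChar ':' = ':' := (pvLowerChar_eq_colon_iff ':').mpr rfl
      cases k with
      | nil =>
        simp [List.cons_prefix_cons, hl]
      | cons a k' =>
        have ha : a ≠ ':' := fun h => hk (h ▸ List.mem_cons_self ..)
        simp only [List.cons_append, List.cons_prefix_cons, hl]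
        constructor
        · rintro ⟨h1, -⟩
          exact absurd h1 ha
        · rintro ⟨-, h2⟩
          exact absurd h2 (by simp)
    · have hb : (c != ':') = true := by simp [hc]
      simp only [hb, if_true, List.map_cons]
      cases k with
      | nil =>
        simp only [List.nil_append, List.cons_prefix_cons]
        constructor
        · rintro ⟨h1, -⟩
          exact absurd ((pvLowerChar_eq_colon_iff c).mp h1.symm) hc
        · rintro ⟨h, h2⟩
          · exact absurd h2 (by simp)
      | cons a k' =>
        have hk' : ':' ∉ k' := fun h => hk (List.mem_cons_of_mem _ h)
        simp only [List.cons_append, List.cons_prefix_cons, List.cons_eq_cons]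
        rw [ih k' hk']
        constructor
        · rintro ⟨h1, h2, h3⟩
          refine ⟨Or.inr h2, h1.symm, h3⟩
        · rintro ⟨h1, h2, h3⟩
          rcases h1 with h1 | h1
          · exact absurd h1.symm hc
          · exact ⟨h2.symm, h1, h3⟩

theorem pvBTable_cons2 (line : String) (rest : List String) (d : PySem.Dict String String) (n v : String)
    (hs : PySem.Str.splitMax? line ":" 1 = some [n, v]) :
    pvBTable (line :: rest) d =
      pvBTable rest (if d.contains (PySem.Str.lower n) then d
                     else d.insert (PySem.Str.lower n) (PySem.Str.strip v)) := by
  conv_lhs => simp only [pvBTable]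
  rw [hs]

theorem pvBTable_skip (line : String) (rest : List String) (d : PySem.Dict String String) (n : String)
    (hs : PySem.Str.splitMax? line ":" 1 = some [n]) :
    pvBTable (line :: rest) d = pvBTable rest d := by
  conv_lhs => simp only [pvBTable]
  rw [hs]

theorem pvALoop_hit (hn line : String) (rest : List String) (n v : String)
    (hc : PySem.Str.startswith (PySem.Str.lower line) (PySem.Str.lower hn ++ ":") = true)
    (hs : PySem.Str.splitMax? line ":" 1 = some [n, v]) :
    pvALoop hn (line :: rest) = PySem.Str.strip v := by
  conv_lhs => simp only [pvALoop]
  rw [hc, hs]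
  simp [PySem.List.pyGet?, PySem.List.pyIdx?]

theorem pvALoop_miss (hn line : String) (rest : List String)
    (hc : PySem.Str.startswith (PySem.Str.lower line) (PySem.Str.lower hn ++ ":") = false) :
    pvALoop hn (line :: rest) = pvALoop hn rest := by
  conv_lhs => simp only [pvALoop]
  rw [hc]
  simp

theorem pvInv (lines : List String) (d : PySem.Dict String String) (hn : String) (hcol : ':' ∉ hn.toList) :
    (pvBTable lines d).getD (PySem.Str.lower hn) "" =
      ((d.get? (PySem.Str.lower hn)).getD (pvALoop hn lines)) := by
  induction lines generalizing d with
  | nil => simp [pvBTable, pvALoop, PySem.Dict.getD_eq_get?_getD]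
  | cons line rest ih =>
    have hsep : (":" : String).toList = [':'] := by decide
    have hcondList : PySem.Str.startswith (PySem.Str.lower line) (PySem.Str.lower hn ++ ":") =
        PySem.Chars.startswith (PySem.Chars.lower line.toList) (PySem.Chars.lower hn.toList ++ [':']) := by
      unfold PySem.Str.startswith
      rw [String.toList_append, hsep, PySem.Str.toList_lower, PySem.Str.toList_lower]
    by_cases hmem : ':' ∈ line.toList
    · -- the line has a colon
      have hsplit2 : PySem.Str.splitMax? line ":" 1 =
          some [String.ofList (line.toList.takeWhile (fun c => c != ':')),
                String.ofList ((line.toList.dropWhile (fun c => c != ':')).drop 1)] := by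
        unfold PySem.Str.splitMax?
        rw [hsep, pvSplit_colon, if_pos hmem]
        rfl
      rw [pvBTable_cons2 _ _ _ _ _ hsplit2]
      by_cases heq : PySem.Chars.lower (line.toList.takeWhile (fun c => c != ':')) = PySem.Chars.lower hn.toList
      · -- this line's key equals the looked-up key
        have hcond : PySem.Str.startswith (PySem.Str.lower line) (PySem.Str.lower hn ++ ":") = true := by
          rw [hcondList]
          exact (pvStartswith_iff _ _ (pvColon_not_mem_lower _ hcol)).mpr ⟨hmem, heq⟩
        have hkeys : PySem.Str.lower (String.ofList (line.toList.takeWhile (fun c => c != ':'))) = PySem.Str.lower hn := by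
          unfold PySem.Str.lower
          rw [String.toList_ofList, heq]
        rw [pvALoop_hit _ _ _ _ _ hcond hsplit2, hkeys]
        by_cases hcont : d.contains (PySem.Str.lower hn)
        · simp only [hcont, if_true]
          rw [ih d]
          obtain ⟨v, hv⟩ : ∃ v, d.get? (PySem.Str.lower hn) = some v := by
            rcases ho : d.get? (PySem.Str.lower hn) with _ | v
            · rw [PySem.Dict.get?_eq_none_iff_contains] at ho; rw [ho] at hcont; cases hcont
            · exact ⟨v, rfl⟩
          rw [hv]
          simp only [Option.getD_some]
        · have hnone : d.get? (PySem.Str.lower hn) = none :=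
            (PySem.Dict.get?_eq_none_iff_contains d _).mpr (by simpa using hcont)
          simp only [hcont, if_false, Bool.false_eq_true]
          rw [ih, PySem.Dict.get?_insert_self, hnone]
          simp only [Option.getD_some, Option.getD_none]
      · -- key differs: A skips the line; B's table change (if any) is at a different key
        have hcond : PySem.Str.startswith (PySem.Str.lower line) (PySem.Str.lower hn ++ ":") = false := by
          rw [hcondList, Bool.eq_false_iff]
          intro hc
          exact heq ((pvStartswith_iff _ _ (pvColon_not_mem_lower _ hcol)).mp hc).2
        have hkeys : PySem.Str.lower (String.ofList (line.toList.takeWhile (fun c => c != ':'))) ≠ PySem.Str.lower hn := by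
          intro h
          apply heq
          have := congrArg String.toList h
          unfold PySem.Str.lower at this
          rwa [String.toList_ofList, String.toList_ofList, String.toList_ofList] at this
        rw [pvALoop_miss _ _ _ hcond]
        by_cases hcont : d.contains (PySem.Str.lower (String.ofList (line.toList.takeWhile (fun c => c != ':'))))
        · simp only [hcont, if_true]
          exact ih d
        · simp only [hcont, if_false, Bool.false_eq_true]
          rw [ih, PySem.Dict.get?_insert_of_ne _ _ (Ne.symm hkeys)]
    · -- no colon in the line: A's test is false, B skips the line
      have hsplit1 : PySem.Str.splitMax? line ":" 1 = some [String.ofList line.toList] := by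
        unfold PySem.Str.splitMax?
        rw [hsep, pvSplit_colon, if_neg hmem]
        rfl
      have hcond : PySem.Str.startswith (PySem.Str.lower line) (PySem.Str.lower hn ++ ":") = false := by
        rw [hcondList, Bool.eq_false_iff]
        intro hc
        exact hmem ((pvStartswith_iff _ _ (pvColon_not_mem_lower _ hcol)).mp hc).1
      rw [pvALoop_miss _ _ _ hcond, pvBTable_skip _ _ _ _ hsplit1]
      exact ih d

-- ===== VERDICT (by name: the statement is the Claim_ definition above) =====
theorem extract_header_field_value_from_raw_string_body_spec : Claim_equal_extract_header_field_value_from_raw_string_body := by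
  intro h raw _
  unfold Spec_extract_header_field_value_from_raw_string_body
  unfold extract_header_field_value_from_raw_string_body extract_header_field_value_from_raw_string_body_alt
  by_cases hh : h = ""
  · simp [hh]
  · simp only [hh, if_false]
    rw [pvInv _ _ _ (pvColon_not_mem_replace h)]
    simp [PySem.Dict.get?_empty]
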